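-- pv_equiv track=rewrite | github.com/thelongcommute/codechef | little_elephant_and_permutations/treeroot-bruteforce.py | possible_children
-- ===== SOURCE A (Python) =====
-- import math
--
-- def possible_children(n, parent, id_set):
--     output = []
--     for i in range(math.ceil(n / 2)):
--         j = n - i
--         if (i == 0 or i in id_set) and (j in id_set) and not ((i or j) == parent):
--             output.append((i, j))
--     if output:
--         return output
--     return [(0, 0)]
-- ===== SOURCE B (Python) =====
-- def possible_children(n, parent, id_set):
--     # Iterate over the candidate set {0} | id_set (sorted) instead of scanning
--     # every integer in range(ceil(n/2)); the first conjunct of A's test is then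
--     # automatic and only the bound, the partner test and the parent test remain.
--     half = (n + 1) // 2  # == ceil(n / 2) for integer n
--     out = []
--     for i in sorted(set(id_set) | {0}):
--         if 0 <= i < half and (n - i) in id_set and (n - i if i == 0 else i) != parent:
--             out.append((i, n - i))
--     return out if out else [(0, 0)]
-- ===== Notes on version B (the rewrite author's own statement) =====
-- stated objective: alternative
-- what changed: Instead of scanning every integer i in range(ceil(n/2)) and testing membership, B iterates only over the sorted candidate set {0} | id_set (which makes A's first conjunct automatic) and keeps the pairs that satisfy the bound, partner and parent tests; it trades the linear range scan for a sort of the set's members.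
import Mathlib
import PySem

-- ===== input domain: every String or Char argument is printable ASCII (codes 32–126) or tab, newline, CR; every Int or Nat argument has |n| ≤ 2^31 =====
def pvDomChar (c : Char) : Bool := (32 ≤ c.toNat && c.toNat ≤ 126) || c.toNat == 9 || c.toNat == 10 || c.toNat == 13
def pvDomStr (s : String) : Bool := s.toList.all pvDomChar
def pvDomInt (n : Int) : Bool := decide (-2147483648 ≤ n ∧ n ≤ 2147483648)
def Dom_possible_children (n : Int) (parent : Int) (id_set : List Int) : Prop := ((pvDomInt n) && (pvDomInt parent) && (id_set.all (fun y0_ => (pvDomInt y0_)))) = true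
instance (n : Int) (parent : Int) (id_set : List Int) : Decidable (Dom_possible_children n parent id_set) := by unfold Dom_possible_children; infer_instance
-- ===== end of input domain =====

-- B iterates over the sorted candidate set {0} ∪ id_set instead of scanning every
-- integer in range(ceil(n/2)); same return value, proved equal below.
-- ===== PORT A =====
-- math.ceil(n / 2): exact as -((-n) // 2) for the integer n admitted by Dom (|n| ≤ 2^31, so n/2 is float-exact)
def possible_children (n : Int) (parent : Int) (id_set : List Int) : List (Int × Int) :=
  let output := (PySem.List.pyRange 0 (-(PySem.Int.floordiv (-n) 2)) 1).foldl
    (fun output i =>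
      let j := n - i
      if (i == 0 || id_set.contains i) && id_set.contains j
          && !((if i == 0 then j else i) == parent)
      then output ++ [(i, j)] else output) []
  if output.isEmpty then [(0, 0)] else output

-- ===== PORT B =====
def possible_children_alt (n : Int) (parent : Int) (id_set : List Int) : List (Int × Int) :=
  let half := PySem.Int.floordiv (n + 1) 2
  let out := (PySem.List.sorted (PySem.Set.union (PySem.Set.ofList id_set) [0]) (fun x => x) false).foldl
    (fun out i =>
      if (decide (0 ≤ i) && decide (i < half)) && id_set.contains (n - i)
          && ((if i == 0 then n - i else i) != parent)
      then out ++ [(i, n - i)] else out) []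
  if out.isEmpty then [(0, 0)] else out

-- ===== PRECONDITION & SPEC =====
def Spec_possible_children (n : Int) (parent : Int) (id_set : List Int) (out : List (Int × Int)) : Prop := out = possible_children_alt n parent id_set
instance (n : Int) (parent : Int) (id_set : List Int) (out : List (Int × Int)) : Decidable (Spec_possible_children n parent id_set out) := by unfold Spec_possible_children; infer_instance

-- ===== CLAIM (what is proved, stated in full; the proofs are below) =====
def Claim_equal_possible_children : Prop := ∀ (n : Int) (parent : Int) (id_set : List Int), Dom_possible_children n parent id_set → Spec_possible_children n parent id_set (possible_children n parent id_set)

-- ===== LEMMAS AND PROOFS =====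

-- both programs' loop bound is ceil(n/2)
theorem pvCeil_eq (n : Int) :
    -(PySem.Int.floordiv (-n) 2) = PySem.Int.floordiv (n + 1) 2 := by
  rw [PySem.Int.floordiv_eq_ediv_of_pos (by norm_num : (0:Int) < 2),
      PySem.Int.floordiv_eq_ediv_of_pos (by norm_num : (0:Int) < 2)]
  omega

-- set(id_set) | {0} = set(id_set ++ [0])
theorem pvUnion_eq (id_set : List Int) :
    PySem.Set.union (PySem.Set.ofList id_set) [0] = PySem.Set.ofList (id_set ++ [0]) := by
  simp [PySem.Set.union, PySem.Set.ofList_eq_foldl, List.foldl_append, PySem.Set.update]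

-- the two filtered index lists coincide
theorem pvFilter_eq (n parent : Int) (id_set : List Int) :
    (PySem.List.pyRange 0 (-(PySem.Int.floordiv (-n) 2)) 1).filter
      (fun i => (i == 0 || id_set.contains i) && id_set.contains (n - i)
          && !((if i == 0 then n - i else i) == parent))
    = (PySem.List.sorted (PySem.Set.union (PySem.Set.ofList id_set) [0]) (fun x => x) false).filter
      (fun i => (decide (0 ≤ i) && decide (i < PySem.Int.floordiv (n + 1) 2))
          && id_set.contains (n - i) && ((if i == 0 then n - i else i) != parent)) := by
  rw [pvUnion_eq]
  apply List.Perm.eq_of_pairwise (le := fun a b : Int => a ≤ b)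
        (fun a b _ _ h1 h2 => le_antisymm h1 h2)
        (((PySem.List.pairwise_lt_pyRange_one 0 _).filter _).imp (fun h => le_of_lt h))
        (((PySem.List.sorted_ofList_pairwise_lt _).filter _).imp (fun h => le_of_lt h))
  apply (List.perm_ext_iff_of_nodup ?_ ?_).mpr
  case _ =>
      intro x
      simp only [List.mem_filter, PySem.List.mem_pyRange_one, PySem.List.mem_sorted,
        PySem.Set.mem_ofList, List.mem_append, List.mem_singleton, pvCeil_eq,
        Bool.and_eq_true, Bool.or_eq_true, beq_iff_eq, bne_iff_ne, Bool.not_eq_eq_eq_not,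
        Bool.not_true, beq_eq_false_iff_ne, decide_eq_true_eq, List.contains_eq_mem,
        ne_eq]
      by_cases hx : x = 0 <;> subst_eqs <;> constructor <;> intro h <;> tauto
  case _ => exact ((PySem.List.pairwise_lt_pyRange_one 0 _).filter _).imp (fun h => ne_of_lt h)
  case _ => exact ((PySem.List.sorted_ofList_pairwise_lt _).filter _).imp (fun h => ne_of_lt h)

-- ===== VERDICT (by name: the statement is the Claim_ definition above) =====
theorem possible_children_spec : Claim_equal_possible_children := by
  intro n parent id_set _
  unfold Spec_possible_children possible_children possible_children_alt
  simp only [PySem.List.foldl_append_if, List.nil_append]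
  rw [pvFilter_eq n parent id_set]
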